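-- pv_equiv track=rewrite | github.com/rlakshgit/RL_newrepo | Astronomer.io/dags/hubspot/common/dq_common.py | dq_support_unicode_strip
-- ===== SOURCE A (Python) =====
-- def dq_support_unicode_strip(x):
--     '''
--     This is an apply support function removing all unicode values from a string.  There is no replacement at this
--     time strict removal only.
--     :param x: This is the value from the apply function that the transformation must occur on
--     :return:Return would be X with the appropriate transformations.
--     '''
--     if '\\' in x:
--         x_list = list(x)
--         unicode_list = []
--         counter = 0
--         trap_counter = -1
--         for c in x:
--             if c == '\\':
--                 build_string = ''
--                 for i in range(counter, counter + 4):
--                     build_string = build_string + x_list[i]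
--                 unicode_list.append(build_string)
--                 trap_counter = counter + 3
--             else:
--                 if counter <= trap_counter:
--                     counter += 1
--                     continue
--                 else:
--                     unicode_list.append(x_list[counter])
--             counter += 1
--         new_string = ''
--         for i in unicode_list:
--             if '\\' in i:
--                 continue
--             else:
--                 new_string = new_string + i
--         return new_string
--     else:
--         return x
-- ===== SOURCE B (Python) =====
-- def dq_support_unicode_strip(x):
--     if '\\' not in x:
--         return x
--     out = []
--     skip = 0
--     for c in x:
--         if c == '\\':
--             skip = 3
--         elif skip > 0:
--             skip -= 1
--         else:
--             out.append(c)
--     return ''.join(out)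
-- ===== Notes on version B (the rewrite author's own statement) =====
-- stated objective: simpler
-- what changed: Replaces A's two-phase scheme (collect 4-char escape blocks and kept chars into a list, then filter out block strings) with a single stateful pass that keeps a skip counter, never materialising the escape blocks.
-- crash fix: A raises IndexError whenever a backslash occurs within the last 3 characters of a string containing a backslash (its block build reads past the end); B simply strips that trailing escape and returns the remaining kept characters. — e.g. on dq_support_unicode_strip("ab\\"): A raises IndexError, B returns "ab"
import Mathlib
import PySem

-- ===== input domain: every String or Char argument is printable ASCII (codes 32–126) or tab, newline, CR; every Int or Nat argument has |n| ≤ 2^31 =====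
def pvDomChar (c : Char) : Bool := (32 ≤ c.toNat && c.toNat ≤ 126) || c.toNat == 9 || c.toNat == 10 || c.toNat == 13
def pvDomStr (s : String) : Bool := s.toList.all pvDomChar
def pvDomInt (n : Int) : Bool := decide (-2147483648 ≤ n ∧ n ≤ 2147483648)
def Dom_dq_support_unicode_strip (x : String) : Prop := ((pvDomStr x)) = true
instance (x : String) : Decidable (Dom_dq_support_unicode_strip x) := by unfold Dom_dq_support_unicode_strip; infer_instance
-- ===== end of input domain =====

-- B replaces A's two-phase "collect escape blocks and kept chars, then filter out the blocks"
-- with one pass keeping a skip counter (objective: simpler).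

-- ===== PORT A =====
-- build_string = ''; for i in range(counter, counter+4): build_string += x_list[i]
-- (x_list[i] is pyGet?; the .getD ' ' default is reached exactly where Python raises IndexError, outside Pre_)
def pvABuild (x_list : List Char) (counter : Int) : List Char :=
  (PySem.List.pyRange counter (counter + 4) 1).foldl
    (fun b i => b ++ [(PySem.List.pyGet? x_list i).getD ' ']) []

-- the 'for c in x' loop; state = (counter, trap_counter, unicode_list); strings carried as List Char
def pvALoop (x_list : List Char) : List Char → Int → Int → List (List Char) → List (List Char)
  | [], _, _, unicode_list => unicode_list
  | c :: rest, counter, trap_counter, unicode_list =>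
    if c = '\\' then
      pvALoop x_list rest (counter + 1) (counter + 3) (unicode_list ++ [pvABuild x_list counter])
    else if counter ≤ trap_counter then
      pvALoop x_list rest (counter + 1) trap_counter unicode_list
    else
      pvALoop x_list rest (counter + 1) trap_counter (unicode_list ++ [[c]])

-- the final 'for i in unicode_list' filter loop building new_string
def pvAFilter (unicode_list : List (List Char)) : List Char :=
  unicode_list.foldl (fun new_string i => if '\\' ∈ i then new_string else new_string ++ i) []

def dq_support_unicode_strip (x : String) : String :=
  if PySem.Str.isIn "\\" x then
    String.ofList (pvAFilter (pvALoop x.toList x.toList 0 (-1) []))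
  else x

-- ===== PORT B =====
-- single pass: skip counter + output accumulator
def pvBLoop : List Char → Int → List Char → List Char
  | [], _, out => out
  | c :: rest, skip, out =>
    if c = '\\' then pvBLoop rest 3 out
    else if skip > 0 then pvBLoop rest (skip - 1) out
    else pvBLoop rest skip (out ++ [c])

def dq_support_unicode_strip_alt (x : String) : String :=
  if PySem.Str.isIn "\\" x then
    String.ofList (pvBLoop x.toList 0 [])
  else x

-- ===== PRECONDITION & SPEC =====
-- Pre_ excludes exactly the inputs where Python A raises IndexError: a backslash within the last 3 characters.
def Pre_dq_support_unicode_strip (x : String) : Prop :=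
  ∀ i, (h : i < x.toList.length) → x.toList[i] = '\\' → i + 4 ≤ x.toList.length
instance (x : String) : Decidable (Pre_dq_support_unicode_strip x) := by
  unfold Pre_dq_support_unicode_strip; infer_instance

def pvWitness_dq_support_unicode_strip : String := "a\\u12bc"

-- A raises IndexError on strings with a backslash within the last 3 characters; B strips that trailing escape and returns the kept characters.
def Raises_dq_support_unicode_strip (x : String) : Prop :=
  ∃ i, ∃ _ : i < x.toList.length, x.toList[i] = '\\' ∧ x.toList.length < i + 4
instance (x : String) : Decidable (Raises_dq_support_unicode_strip x) := by
  unfold Raises_dq_support_unicode_strip; infer_instance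

def pvRaiseWitness_dq_support_unicode_strip : String := "ab\\"
def pvRaiseWitnessOut_dq_support_unicode_strip : String := "ab"

def Spec_dq_support_unicode_strip (x : String) (out : String) : Prop := out = dq_support_unicode_strip_alt x
instance (x : String) (out : String) : Decidable (Spec_dq_support_unicode_strip x out) := by unfold Spec_dq_support_unicode_strip; infer_instance

-- ===== CLAIM (what is proved, stated in full; the proofs are below) =====
def Claim_equal_dq_support_unicode_strip : Prop := ∀ (x : String), Dom_dq_support_unicode_strip x → Pre_dq_support_unicode_strip x → Spec_dq_support_unicode_strip x (dq_support_unicode_strip x)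

def Claim_raises_dq_support_unicode_strip : Prop := (∀ (x : String), Dom_dq_support_unicode_strip x → Raises_dq_support_unicode_strip x → ¬ Pre_dq_support_unicode_strip x) ∧ (Dom_dq_support_unicode_strip (pvRaiseWitness_dq_support_unicode_strip) ∧ Raises_dq_support_unicode_strip (pvRaiseWitness_dq_support_unicode_strip) ∧ dq_support_unicode_strip_alt (pvRaiseWitness_dq_support_unicode_strip) = pvRaiseWitnessOut_dq_support_unicode_strip)

-- ===== LEMMAS AND PROOFS =====

-- appending to the filter accumulator distributes
lemma pvAFilter_from (ul : List (List Char)) (ns : List Char) :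
    ul.foldl (fun new_string i => if '\\' ∈ i then new_string else new_string ++ i) ns
      = ns ++ pvAFilter ul := by
  induction ul generalizing ns with
  | nil => simp [pvAFilter]
  | cons h t ih =>
    simp only [pvAFilter, List.foldl_cons]
    rw [ih, ih (if '\\' ∈ h then [] else [] ++ h)]
    split <;> simp

lemma pvAFilter_append (u v : List (List Char)) :
    pvAFilter (u ++ v) = pvAFilter u ++ pvAFilter v := by
  simp only [pvAFilter, List.foldl_append]
  rw [pvAFilter_from]
  rfl

lemma pvBLoop_from (l : List Char) (skip : Int) (out : List Char) :
    pvBLoop l skip out = out ++ pvBLoop l skip [] := by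
  induction l generalizing skip out with
  | nil => simp [pvBLoop]
  | cons c rest ih =>
    simp only [pvBLoop]
    split
    · exact ih 3 out
    · split
      · exact ih (skip - 1) out
      · rw [ih skip (out ++ [c]), ih skip ([] ++ [c])]
        simp

-- the escape block built at a backslash position contains the backslash
lemma pvABuild_mem (x_list : List Char) (n : Nat) (rest : List Char)
    (hdrop : x_list.drop n = '\\' :: rest) :
    '\\' ∈ pvABuild x_list (n : Int) := by
  have hn : (n : Int) < (n : Int) + 4 := by omega
  have hget : PySem.List.pyGet? x_list (n : Int) = some '\\' := by
    rw [PySem.List.pyGet?_natCast]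
    have h0 : x_list[n]? = some '\\' := by
      have h := (List.getElem?_drop : (List.drop n x_list)[0]? = x_list[n + 0]?)
      rw [hdrop] at h
      simpa using h.symm
    simp [h0]
  unfold pvABuild
  rw [PySem.List.pyRange_one_cons hn]
  simp only [List.foldl_cons, List.nil_append, hget, Option.getD_some]
  -- '\\' is in the seed; further folding only appends
  have key : ∀ (is : List Int) (b : List Char), '\\' ∈ b →
      '\\' ∈ is.foldl (fun b i => b ++ [(PySem.List.pyGet? x_list i).getD ' ']) b := by
    intro is
    induction is with
    | nil => intro b hb; exact hb
    | cons i it ih =>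
      intro b hb
      simp only [List.foldl_cons]
      exact ih _ (by simp [hb])
  exact key _ ['\\'] (by simp)

-- main invariant: A's filtered result from position n equals B's pass with skip = max (trap+1-n) 0
lemma pvMain (x_list : List Char) :
    ∀ (l : List Char) (n : Nat) (trap : Int) (ul : List (List Char)),
      x_list.drop n = l →
      pvAFilter (pvALoop x_list l (n : Int) trap ul)
        = pvAFilter ul ++ pvBLoop l (max (trap + 1 - (n : Int)) 0) [] := by
  intro l
  induction l with
  | nil => intro n trap ul _; simp [pvALoop, pvBLoop]
  | cons c rest ih =>
    intro n trap ul hdrop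
    have hdrop' : x_list.drop (n + 1) = rest := by
      have h1 : x_list.drop (n + 1) = (x_list.drop n).drop 1 := by
        rw [List.drop_drop]
      rw [h1, hdrop]
      simp
    simp only [pvALoop, pvBLoop]
    by_cases hc : c = '\\'
    · subst hc
      rw [if_pos rfl, if_pos rfl]
      have hrec := ih (n + 1) ((n : Int) + 3) (ul ++ [pvABuild x_list (n : Int)]) hdrop'
      push_cast at hrec
      rw [hrec, pvAFilter_append]
      have hmem : '\\' ∈ pvABuild x_list (n : Int) := pvABuild_mem x_list n rest hdrop
      have hb : pvAFilter [pvABuild x_list (n : Int)] = [] := by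
        simp [pvAFilter, hmem]
      rw [hb]
      have h3 : max ((n : Int) + 3 + 1 - ((n : Int) + 1)) 0 = 3 := by omega
      rw [h3]
      simp
    · rw [if_neg hc, if_neg hc]
      by_cases htrap : (n : Int) ≤ trap
      · rw [if_pos htrap]
        have hrec := ih (n + 1) trap ul hdrop'
        push_cast at hrec
        rw [hrec]
        have hgt : max (trap + 1 - (n : Int)) 0 > 0 := by omega
        rw [if_pos hgt]
        have hs : max (trap + 1 - (n : Int)) 0 - 1 = max (trap + 1 - ((n : Int) + 1)) 0 := by omega
        rw [hs]
      · rw [if_neg htrap]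
        have hrec := ih (n + 1) trap (ul ++ [[c]]) hdrop'
        push_cast at hrec
        rw [hrec, pvAFilter_append]
        have hz : max (trap + 1 - (n : Int)) 0 = 0 := by omega
        have hz' : max (trap + 1 - ((n : Int) + 1)) 0 = 0 := by omega
        rw [hz, hz']
        have hf : pvAFilter [[c]] = [c] := by
          simp only [pvAFilter, List.foldl_cons, List.foldl_nil, List.mem_singleton]
          rw [if_neg (fun h => hc h.symm)]
          simp
        rw [hf, if_neg (by omega), pvBLoop_from rest 0 ([] ++ [c])]
        simp

-- ===== VERDICT (by name: the statement is the Claim_ definition above) =====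
theorem dq_support_unicode_strip_spec : Claim_equal_dq_support_unicode_strip := by
  intro x _ _
  unfold Spec_dq_support_unicode_strip dq_support_unicode_strip dq_support_unicode_strip_alt
  by_cases h : PySem.Str.isIn "\\" x
  · rw [if_pos h, if_pos h]
    have := pvMain x.toList x.toList 0 (-1) [] (by simp)
    simp only [Nat.cast_zero] at this
    rw [this]
    norm_num [pvAFilter]
  · rw [if_neg h, if_neg h]

theorem dq_support_unicode_strip_raises : Claim_raises_dq_support_unicode_strip := by
  unfold Claim_raises_dq_support_unicode_strip
  constructor
  · intro x _ hr hpre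
    obtain ⟨i, hi, hbs, hlt⟩ := hr
    exact absurd (hpre i hi hbs) (by omega)
  · exact ⟨by decide, ⟨2, by decide, by decide, by decide⟩, by decide⟩

-- self-check of the crash-fix block (keeps dq_support_unicode_strip_raises referenced)
theorem dq_support_unicode_strip_raises_ok : Claim_raises_dq_support_unicode_strip :=
  And.intro dq_support_unicode_strip_raises.1 dq_support_unicode_strip_raises.2
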